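-- pv_equiv track=rewrite | github.com/eoriont/assignment-problems | src/conditional_probability.py | calc_probs
-- ===== SOURCE A (Python) =====
-- def calc_probs(trial):
--     probabilities = [0, 0, 0, 0]
--     trials_to_consider = [0, 0]
--     for i in range(len(trial)-1):
--         two_flips = trial[i:i+2]
--         flips = ['HH', 'HT', 'TH', 'TT']
--         probabilities[flips.index(two_flips)] += 1
--         trials_to_consider[flips.index(two_flips) // 2] += 1
--     return probabilities, trials_to_consider
-- ===== SOURCE B (Python) =====
-- def calc_probs(trial):
--     # Count the four adjacent pairs directly over zipped neighbours,
--     # then derive the per-first-flip totals by summation afterwards.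
--     pairs = list(zip(trial, trial[1:]))
--     hh = pairs.count(('H', 'H'))
--     ht = pairs.count(('H', 'T'))
--     th = pairs.count(('T', 'H'))
--     tt = pairs.count(('T', 'T'))
--     return [hh, ht, th, tt], [hh + ht, th + tt]
-- ===== Notes on version B (the rewrite author's own statement) =====
-- stated objective: simpler
-- what changed: Replaces the index-driven loop that maintains two lockstep accumulators via list.index lookups with a single zip of neighbouring characters counted four times, deriving the per-first-flip totals arithmetically after the pass.
import Mathlib
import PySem

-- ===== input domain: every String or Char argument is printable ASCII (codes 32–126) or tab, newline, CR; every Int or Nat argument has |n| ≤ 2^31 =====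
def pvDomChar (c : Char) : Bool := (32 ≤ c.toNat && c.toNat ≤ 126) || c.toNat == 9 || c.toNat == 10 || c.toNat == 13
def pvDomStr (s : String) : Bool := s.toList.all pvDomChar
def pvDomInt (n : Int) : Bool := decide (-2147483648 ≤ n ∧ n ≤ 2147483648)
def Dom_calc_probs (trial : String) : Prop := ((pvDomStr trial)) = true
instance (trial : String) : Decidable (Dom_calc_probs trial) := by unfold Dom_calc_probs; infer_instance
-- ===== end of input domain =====

-- B replaces A's index-driven loop with two lockstep accumulators by a zip of
-- neighbouring characters counted four times plus a trailing arithmetic reduction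
-- (objective: simpler). A raises ValueError on an adjacent pair outside
-- {HH,HT,TH,TT}; those inputs are outside Pre_.

-- ===== PORT A =====
-- probabilities[k] += 1 on a Python list: set index k to its value plus one (k always in range here)
def pvBump (l : List Int) (k : Nat) : List Int := l.set k (l.getD k 0 + 1)

def calc_probs (trial : String) : List Int × List Int :=
  (((PySem.List.pyRange 0 (PySem.Str.len trial - 1) 1).foldl
      (fun st i =>
        match st with
        | none => none  -- a ValueError was raised earlier in the loop
        | some (probabilities, trials_to_consider) =>
          let two_flips := PySem.Str.slice trial (some i) (some (i + 2))
          let flips : List String := ["HH", "HT", "TH", "TT"]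
          match PySem.List.index? flips two_flips with
          | none => none  -- flips.index(two_flips) raises ValueError
          | some k => some (pvBump probabilities k, pvBump trials_to_consider (k / 2)))
      (some ([0, 0, 0, 0], [0, 0]))).getD ([0, 0, 0, 0], [0, 0]))

-- ===== PORT B =====
def calc_probs_alt (trial : String) : List Int × List Int :=
  let pairs := trial.toList.zip (trial.toList.drop 1)
  let hh : Int := PySem.List.count pairs ('H', 'H')
  let ht : Int := PySem.List.count pairs ('H', 'T')
  let th : Int := PySem.List.count pairs ('T', 'H')
  let tt : Int := PySem.List.count pairs ('T', 'T')
  ([hh, ht, th, tt], [hh + ht, th + tt])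

-- ===== PRECONDITION & SPEC =====
-- Pre_ excludes exactly the inputs on which A raises ValueError: a string of
-- length ≥ 2 containing a character other than 'H'/'T' (some adjacent pair is
-- then not in ['HH','HT','TH','TT']).
def Pre_calc_probs (trial : String) : Prop :=
  trial.toList.length ≤ 1 ∨ trial.toList.all (fun c => c == 'H' || c == 'T') = true
instance (trial : String) : Decidable (Pre_calc_probs trial) := by
  unfold Pre_calc_probs; infer_instance

def pvWitness_calc_probs : String := "HTTHH"

def Spec_calc_probs (trial : String) (out : List Int × List Int) : Prop := out = calc_probs_alt trial
instance (trial : String) (out : List Int × List Int) : Decidable (Spec_calc_probs trial out) := by unfold Spec_calc_probs; infer_instance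

-- ===== CLAIM (what is proved, stated in full; the proofs are below) =====
def Claim_equal_calc_probs : Prop := ∀ (trial : String), Dom_calc_probs trial → Pre_calc_probs trial → Spec_calc_probs trial (calc_probs trial)

-- ===== LEMMAS AND PROOFS =====

-- A's loop rewritten on the character list: fold over Nat indices, slicing by drop/take.
def pvAloop (cs : List Char) (st : Option (List Int × List Int)) : Option (List Int × List Int) :=
  (List.range (cs.length - 1)).foldl
    (fun st k =>
      match st with
      | none => none
      | some (probabilities, trials_to_consider) =>
        match PySem.List.index? ["HH", "HT", "TH", "TT"]
            (String.ofList ((cs.drop k).take 2)) with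
        | none => none
        | some j => some (pvBump probabilities j, pvBump trials_to_consider (j / 2)))
    st

-- the slice trial[i:i+2] at a Nat index is drop/take on the character list
theorem pvSlice_eq (trial : String) (k : Nat) :
    PySem.Str.slice trial (some ((0:Int) + (k:Int))) (some ((0:Int) + (k:Int) + 2)) =
      String.ofList ((trial.toList.drop k).take 2) := by
  apply String.toList_inj.mp
  rw [PySem.Str.toList_slice]
  simp only [PySem.Chars.slice_eq_listSlice, zero_add]
  have h2 : ((k:Int) + 2) = ((k:Int) + ((2:Nat):Int)) := by norm_num
  rw [h2, PySem.List.slice_natCast_add]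
  simp

theorem pvCalc_probs_eq (trial : String) :
    calc_probs trial = (pvAloop trial.toList (some ([0,0,0,0],[0,0]))).getD ([0,0,0,0],[0,0]) := by
  unfold calc_probs pvAloop
  rw [PySem.Str.len_eq, PySem.List.pyRange_one]
  have hlen : (((trial.toList.length : Int)) - 1 - 0).toNat = trial.toList.length - 1 := by omega
  rw [hlen, List.foldl_map]
  congr 1
  apply PySem.List.foldl_congr_mem
  intro st k hk
  cases st with
  | none => rfl
  | some p => simp only [pvSlice_eq]

-- the fold with arbitrary accumulators, characterized by pair counts, for valid strings
theorem pvAloop_valid (cs : List Char) (h : ∀ c ∈ cs, c = 'H' ∨ c = 'T') :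
    ∀ (a b c d e f : Int),
      pvAloop cs (some ([a, b, c, d], [e, f])) =
        some ([a + PySem.List.count (cs.zip (cs.drop 1)) ('H','H'),
               b + PySem.List.count (cs.zip (cs.drop 1)) ('H','T'),
               c + PySem.List.count (cs.zip (cs.drop 1)) ('T','H'),
               d + PySem.List.count (cs.zip (cs.drop 1)) ('T','T')],
              [e + PySem.List.count (cs.zip (cs.drop 1)) ('H','H')
                 + PySem.List.count (cs.zip (cs.drop 1)) ('H','T'),
               f + PySem.List.count (cs.zip (cs.drop 1)) ('T','H')
                 + PySem.List.count (cs.zip (cs.drop 1)) ('T','T')]) := by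
  induction cs with
  | nil => intro a b c d e f; simp [pvAloop, PySem.List.count]
  | cons x t ih =>
    intro a b c d e f
    match t with
    | [] => simp [pvAloop, PySem.List.count]
    | y :: t' =>
      have hx : x = 'H' ∨ x = 'T' := h x (by simp)
      have hy : y = 'H' ∨ y = 'T' := h y (by simp)
      have ht : ∀ c ∈ (y :: t'), c = 'H' ∨ c = 'T' := fun c hc => h c (by simp [hc])
      have hzip : (x :: y :: t').zip ((x :: y :: t').drop 1)
          = (x, y) :: ((y :: t').zip ((y :: t').drop 1)) := by simp
      have hlen : (x :: y :: t').length - 1 = ((y :: t').length - 1) + 1 := by simp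
      have hstep : ∀ st, pvAloop (x :: y :: t') st =
          pvAloop (y :: t')
            ((fun st (_ : Nat) =>
              match st with
              | none => none
              | some (probabilities, trials_to_consider) =>
                match PySem.List.index? ["HH", "HT", "TH", "TT"]
                    (String.ofList (((x :: y :: t').drop 0).take 2)) with
                | none => none
                | some j => some (pvBump probabilities j, pvBump trials_to_consider (j / 2))) st 0) := by
        intro st
        unfold pvAloop
        rw [hlen, List.range_succ_eq_map, List.foldl_cons, List.foldl_map]
        rfl
      rcases hx with hx | hx <;> rcases hy with hy | hy <;> subst hx <;> subst hy
      · have hred : pvAloop ('H' :: 'H' :: t') (some ([a, b, c, d], [e, f]))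
            = pvAloop ('H' :: t') (some ([a + 1, b, c, d], [e + 1, f])) := hstep _
        rw [hred, ih ht, hzip]
        simp only [PySem.List.count, List.count_cons]
        norm_num
        ring_nf
        exact ⟨trivial, trivial⟩
      · have hred : pvAloop ('H' :: 'T' :: t') (some ([a, b, c, d], [e, f]))
            = pvAloop ('T' :: t') (some ([a, b + 1, c, d], [e + 1, f])) := hstep _
        rw [hred, ih ht, hzip]
        simp only [PySem.List.count, List.count_cons]
        norm_num
        ring_nf
        exact ⟨trivial, trivial⟩
      · have hred : pvAloop ('T' :: 'H' :: t') (some ([a, b, c, d], [e, f]))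
            = pvAloop ('H' :: t') (some ([a, b, c + 1, d], [e, f + 1])) := hstep _
        rw [hred, ih ht, hzip]
        simp only [PySem.List.count, List.count_cons]
        norm_num
        ring_nf
        exact ⟨trivial, trivial⟩
      · have hred : pvAloop ('T' :: 'T' :: t') (some ([a, b, c, d], [e, f]))
            = pvAloop ('T' :: t') (some ([a, b, c, d + 1], [e, f + 1])) := hstep _
        rw [hred, ih ht, hzip]
        simp only [PySem.List.count, List.count_cons]
        norm_num
        ring_nf
        exact ⟨trivial, trivial⟩

-- ===== VERDICT (by name: the statement is the Claim_ definition above) =====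
theorem calc_probs_spec : Claim_equal_calc_probs := by
  intro trial _ hpre
  unfold Spec_calc_probs
  rw [pvCalc_probs_eq]
  rcases hpre with hlen | hval
  · -- length ≤ 1: the loop runs zero times and there are no pairs
    have hz : trial.toList.zip (trial.toList.drop 1) = [] := by
      match hcs : trial.toList with
      | [] => simp
      | [x] => simp
      | x :: y :: t => rw [hcs] at hlen; simp at hlen
    have hr : trial.toList.length - 1 = 0 := by omega
    unfold pvAloop
    rw [hr]
    simp only [List.range_zero, List.foldl_nil, Option.getD_some]
    rw [List.drop_one] at hz
    simp [calc_probs_alt, hz]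
  · rw [pvAloop_valid trial.toList (by simpa using hval)]
    simp [calc_probs_alt]
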